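-- pv_equiv track=rewrite | github.com/clay-good/vaulytica | vaulytica/agents/incident_response.py | _create_priority_matrix
-- ===== SOURCE A (Python) =====
-- from typing import List, Dict, Any, Optional
--
-- def _create_priority_matrix(
--
--     technical: List[Dict],
--     process: List[Dict],
--     training: List[Dict]
-- ) -> Dict[str, List[Dict]]:
--     """Create priority matrix"""
--     all_actions = technical + process + training
--
--     return {
--         "critical": [a for a in all_actions if a.get("priority") == "critical"],
--         "high": [a for a in all_actions if a.get("priority") == "high"],
--         "medium": [a for a in all_actions if a.get("priority") == "medium"],
--         "low": [a for a in all_actions if a.get("priority") == "low"]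
--     }
-- ===== SOURCE B (Python) =====
-- def _create_priority_matrix(technical, process, training):
--     """Create priority matrix"""
--     result = {"critical": [], "high": [], "medium": [], "low": []}
--     for a in technical + process + training:
--         p = a.get("priority")
--         if p in result:
--             result[p].append(a)
--     return result
-- ===== Notes on version B (the rewrite author's own statement) =====
-- stated objective: alternative
-- what changed: One dispatch pass over the concatenated actions appending each action to its bucket, instead of four independent filtering scans of the whole list.
import Mathlib
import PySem

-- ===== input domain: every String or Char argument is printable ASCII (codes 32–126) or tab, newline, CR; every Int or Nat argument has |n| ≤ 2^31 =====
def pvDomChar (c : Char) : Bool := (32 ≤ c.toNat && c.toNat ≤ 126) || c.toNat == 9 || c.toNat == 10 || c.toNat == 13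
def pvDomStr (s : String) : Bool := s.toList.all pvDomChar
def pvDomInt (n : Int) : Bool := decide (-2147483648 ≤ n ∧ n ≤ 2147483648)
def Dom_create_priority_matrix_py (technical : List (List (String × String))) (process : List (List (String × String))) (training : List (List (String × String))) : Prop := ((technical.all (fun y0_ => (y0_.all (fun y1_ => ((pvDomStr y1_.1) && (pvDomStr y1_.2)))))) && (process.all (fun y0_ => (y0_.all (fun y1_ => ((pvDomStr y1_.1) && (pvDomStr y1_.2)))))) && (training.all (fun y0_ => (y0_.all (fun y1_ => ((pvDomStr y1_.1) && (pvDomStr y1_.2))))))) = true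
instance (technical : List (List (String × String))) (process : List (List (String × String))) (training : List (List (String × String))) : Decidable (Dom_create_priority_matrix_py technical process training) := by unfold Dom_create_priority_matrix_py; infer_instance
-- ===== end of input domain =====

-- B builds all four priority buckets in a single dispatch pass instead of four filtering scans (same return value).


-- ===== PORT A =====
def create_priority_matrix_py (technical : List (List (String × String))) (process : List (List (String × String))) (training : List (List (String × String))) : List (String × List (List (String × String))) :=
  let all_actions := technical ++ process ++ training
  [("critical", all_actions.filter (fun a => List.lookup "priority" a == some "critical")),
   ("high", all_actions.filter (fun a => List.lookup "priority" a == some "high")),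
   ("medium", all_actions.filter (fun a => List.lookup "priority" a == some "medium")),
   ("low", all_actions.filter (fun a => List.lookup "priority" a == some "low"))]

-- ===== PORT B =====
-- one pass: dispatch each action into one of the four accumulated buckets
def pvDispatch (st : List (List (String × String)) × List (List (String × String)) × List (List (String × String)) × List (List (String × String))) (a : List (String × String)) :
    List (List (String × String)) × List (List (String × String)) × List (List (String × String)) × List (List (String × String)) :=
  match List.lookup "priority" a with
  | some p =>
    if p = "critical" then (st.1 ++ [a], st.2.1, st.2.2.1, st.2.2.2)
    else if p = "high" then (st.1, st.2.1 ++ [a], st.2.2.1, st.2.2.2)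
    else if p = "medium" then (st.1, st.2.1, st.2.2.1 ++ [a], st.2.2.2)
    else if p = "low" then (st.1, st.2.1, st.2.2.1, st.2.2.2 ++ [a])
    else st
  | none => st

def create_priority_matrix_py_alt (technical : List (List (String × String))) (process : List (List (String × String))) (training : List (List (String × String))) : List (String × List (List (String × String))) :=
  let st := (technical ++ process ++ training).foldl pvDispatch ([], [], [], [])
  [("critical", st.1), ("high", st.2.1), ("medium", st.2.2.1), ("low", st.2.2.2)]

-- ===== PRECONDITION & SPEC =====
def Spec_create_priority_matrix_py (technical : List (List (String × String))) (process : List (List (String × String))) (training : List (List (String × String))) (out : List (String × List (List (String × String)))) : Prop := out = create_priority_matrix_py_alt technical process training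
instance (technical : List (List (String × String))) (process : List (List (String × String))) (training : List (List (String × String))) (out : List (String × List (List (String × String)))) : Decidable (Spec_create_priority_matrix_py technical process training out) := by unfold Spec_create_priority_matrix_py; infer_instance

-- ===== CLAIM (what is proved, stated in full; the proofs are below) =====
def Claim_equal_create_priority_matrix_py : Prop := ∀ (technical : List (List (String × String))) (process : List (List (String × String))) (training : List (List (String × String))), Dom_create_priority_matrix_py technical process training → Spec_create_priority_matrix_py technical process training (create_priority_matrix_py technical process training)

-- ===== LEMMAS AND PROOFS =====

theorem pvDispatch_inv (l : List (List (String × String))) (c h m lo : List (List (String × String))) :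
    l.foldl pvDispatch (c, h, m, lo) =
      (c ++ l.filter (fun a => List.lookup "priority" a == some "critical"),
       h ++ l.filter (fun a => List.lookup "priority" a == some "high"),
       m ++ l.filter (fun a => List.lookup "priority" a == some "medium"),
       lo ++ l.filter (fun a => List.lookup "priority" a == some "low")) := by
  induction l generalizing c h m lo with
  | nil => simp
  | cons a t ih =>
    rw [List.foldl_cons]
    cases hp : List.lookup "priority" a with
    | none =>
      rw [show pvDispatch (c, h, m, lo) a = (c, h, m, lo) by simp [pvDispatch, hp], ih]
      simp [List.filter_cons, hp]
    | some p =>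
      by_cases h1 : p = "critical"
      · rw [show pvDispatch (c, h, m, lo) a = (c ++ [a], h, m, lo) by simp [pvDispatch, hp, h1], ih]
        simp [List.filter_cons, hp, h1]
      · by_cases h2 : p = "high"
        · rw [show pvDispatch (c, h, m, lo) a = (c, h ++ [a], m, lo) by
            simp [pvDispatch, hp, h1, h2], ih]
          simp [List.filter_cons, hp, h1, h2]
        · by_cases h3 : p = "medium"
          · rw [show pvDispatch (c, h, m, lo) a = (c, h, m ++ [a], lo) by
              simp [pvDispatch, hp, h1, h2, h3], ih]
            simp [List.filter_cons, hp, h1, h2, h3]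
          · by_cases h4 : p = "low"
            · rw [show pvDispatch (c, h, m, lo) a = (c, h, m, lo ++ [a]) by
                simp [pvDispatch, hp, h1, h2, h3, h4], ih]
              simp [List.filter_cons, hp, h1, h2, h3, h4]
            · rw [show pvDispatch (c, h, m, lo) a = (c, h, m, lo) by
                simp [pvDispatch, hp, h1, h2, h3, h4], ih]
              simp [List.filter_cons, hp, h1, h2, h3, h4]

-- ===== VERDICT (by name: the statement is the Claim_ definition above) =====
theorem create_priority_matrix_py_spec : Claim_equal_create_priority_matrix_py := by
  intro technical process training _
  unfold Spec_create_priority_matrix_py create_priority_matrix_py create_priority_matrix_py_alt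
  simp [pvDispatch_inv]
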